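-- pv_equiv track=rewrite | github.com/vijay5599/PS-JS | new.py | smallest_with_substring
-- ===== SOURCE A (Python) =====
-- def smallest_with_substring(word, substr):
--     n, m = len(word), len(substr)
--     candidates = []
--
--     for i in range(n - m + 1):
--         possible = True
--         temp = list(word)
--
--         # Try inserting substr at position i
--         for j in range(m):
--             if temp[i + j] != '?' and temp[i + j] != substr[j]:
--                 possible = False
--                 break
--             temp[i + j] = substr[j]  # Replace ? or leave matching char
--
--         if possible:
--             # Replace remaining ? with 'a' to get smallest lex string
--             final = ''.join(c if c != '?' else 'a' for c in temp)
--             candidates.append(final)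
--
--     return min(candidates) if candidates else "-1"
-- ===== SOURCE B (Python) =====
-- def _char(word, substr, i, p):
--     # character at index p of the candidate obtained by overlaying substr at i
--     c = substr[p - i] if i <= p < i + len(substr) else word[p]
--     return 'a' if c == '?' else c
--
-- def _less(word, substr, i, b):
--     # candidates at i and b agree outside [lo, hi); compare only that window union
--     m = len(substr)
--     lo, hi = min(i, b), max(i, b) + m
--     for p in range(lo, hi):
--         ci, cb = _char(word, substr, i, p), _char(word, substr, b, p)
--         if ci != cb:
--             return ci < cb
--     return False
--
-- def smallest_with_substring(word, substr):
--     n, m = len(word), len(substr)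
--     best = -1
--     for i in range(n - m + 1):
--         if all(c == '?' or c == s for c, s in zip(word[i:i+m], substr)):
--             if best < 0 or _less(word, substr, i, best):
--                 best = i
--     if best < 0:
--         return "-1"
--     return ''.join(_char(word, substr, best, p) for p in range(n))
-- ===== Notes on version B (the rewrite author's own statement) =====
-- stated objective: alternative
-- what changed: B never materialises candidate strings: it keeps only the best placement POSITION, comparing each new valid placement against it with a window-local scan (two candidates can only differ inside the union of their two substr windows) that exits at the first differing character, and builds the single output string once at the end; A copies word, overlays substr, fills '?' and stores a full n-char candidate for every valid position, then takes min() over the list.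
import Mathlib
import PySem

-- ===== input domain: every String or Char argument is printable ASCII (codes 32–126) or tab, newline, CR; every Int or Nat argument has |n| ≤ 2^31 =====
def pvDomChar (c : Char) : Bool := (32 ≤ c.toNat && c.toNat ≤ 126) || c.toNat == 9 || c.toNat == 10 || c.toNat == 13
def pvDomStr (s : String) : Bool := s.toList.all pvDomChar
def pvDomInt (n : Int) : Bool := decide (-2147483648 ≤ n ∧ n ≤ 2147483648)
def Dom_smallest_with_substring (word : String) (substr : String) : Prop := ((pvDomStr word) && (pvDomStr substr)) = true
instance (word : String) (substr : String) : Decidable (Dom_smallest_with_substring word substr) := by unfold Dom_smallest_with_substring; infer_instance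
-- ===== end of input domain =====

-- B picks the best placement POSITION with a window-local, early-exit comparison (two candidates
-- can only differ inside the union of their substr windows) and builds a single output string at
-- the end, instead of A's per-position word copy + full candidate list + global min.


-- ===== PORT A =====
-- A's inner loop 'for j in range(m)' with its break; temp[i+j] is always in range here, so the read
-- is PySem.List.pyGetD and the assignment temp[i+j] = substr[j] is List.set at (i+j).toNat
-- (exact because 0 ≤ i+j < len(temp) on every call A makes).
def pvFillA (s : List Char) (i : Int) (j : Nat) (temp : List Char) : Bool × List Char :=
  if h : j < s.length then
    let c := PySem.List.pyGetD temp (i + (j : Int)) '?'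
    if c ≠ '?' ∧ c ≠ s[j] then (false, temp)
    else pvFillA s i (j + 1) (temp.set (i + (j : Int)).toNat s[j])
  else (true, temp)
termination_by s.length - j

def smallest_with_substring (word : String) (substr : String) : String :=
  let w := word.toList
  let s := substr.toList
  let n : Int := w.length
  let m : Int := s.length
  let candidates : List (List Char) :=
    (PySem.List.pyRange 0 (n - m + 1) 1).foldl (fun cands i =>
      let r := pvFillA s i 0 w
      if r.1 then cands ++ [r.2.map (fun c => if c = '?' then 'a' else c)] else cands) []
  match PySem.List.min? candidates (fun x => x) with
  | some v => String.ofList v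
  | none => "-1"

-- ===== PORT B =====
-- _char(word, substr, i, p): both indexings are in range on every call B makes, so s[p-i] / word[p]
-- are PySem.List.pyGetD (exact).
def pvCharB (w s : List Char) (i : Int) (p : Int) : Char :=
  let c := if i ≤ p ∧ p < i + (s.length : Int) then PySem.List.pyGetD s (p - i) '?'
           else PySem.List.pyGetD w p '?'
  if c = '?' then 'a' else c

-- the 'for p in range(lo, hi)' loop of _less with its early returns
def pvLessGo (w s : List Char) (i : Int) (b : Int) : List Int → Bool
  | [] => false
  | p :: rest =>
    let ci := pvCharB w s i p
    let cb := pvCharB w s b p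
    if ci ≠ cb then decide (ci < cb) else pvLessGo w s i b rest

def pvLessB (w s : List Char) (i : Int) (b : Int) : Bool :=
  pvLessGo w s i b (PySem.List.pyRange (min i b) (max i b + (s.length : Int)) 1)

def smallest_with_substring_alt (word : String) (substr : String) : String :=
  let w := word.toList
  let s := substr.toList
  let n : Int := w.length
  let m : Int := s.length
  let best : Int :=
    (PySem.List.pyRange 0 (n - m + 1) 1).foldl (fun best i =>
      if ((PySem.List.slice w (some i) (some (i + m))).zip s).all
           (fun p => p.1 == '?' || p.1 == p.2) then
        if decide (best < 0) || pvLessB w s i best then i else best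
      else best) (-1)
  if best < 0 then "-1"
  else String.ofList ((PySem.List.pyRange 0 n 1).map (fun p => pvCharB w s best p))

-- ===== PRECONDITION & SPEC =====
def Spec_smallest_with_substring (word : String) (substr : String) (out : String) : Prop := out = smallest_with_substring_alt word substr
instance (word : String) (substr : String) (out : String) : Decidable (Spec_smallest_with_substring word substr out) := by unfold Spec_smallest_with_substring; infer_instance

-- ===== CLAIM (what is proved, stated in full; the proofs are below) =====
def Claim_equal_smallest_with_substring : Prop := ∀ (word : String) (substr : String), Dom_smallest_with_substring word substr → Spec_smallest_with_substring word substr (smallest_with_substring word substr)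

-- ===== LEMMAS AND PROOFS =====

-- the candidate string at a (Nat) placement, in take/drop form
def pvCand (w s : List Char) (i : Nat) : List Char :=
  (w.take i ++ s ++ w.drop (i + s.length)).map (fun c => if c = '?' then 'a' else c)

-- the flag A's inner loop computes is the zip/all test B performs
lemma pvFillA_fst (s : List Char) (i : Nat) :
    ∀ (d j : Nat) (temp : List Char), s.length - j ≤ d → i + s.length ≤ temp.length →
    (pvFillA s (i : Int) j temp).1
      = (((temp.drop (i + j)).take (s.length - j)).zip (s.drop j)).all
          (fun p => p.1 == '?' || p.1 == p.2) := by
  intro d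
  induction d with
  | zero =>
    intro j temp hd _
    have hj : s.length ≤ j := by omega
    rw [pvFillA]
    simp [Nat.not_lt.mpr hj, List.drop_eq_nil_iff.mpr hj]
  | succ d ih =>
    intro j temp hd hlen
    by_cases h : j < s.length
    · have hij : i + j < temp.length := by omega
      rw [pvFillA]
      simp only [h, dif_pos]
      have hcast : (i : Int) + (j : Int) = ((i + j : Nat) : Int) := by push_cast; ring
      have hget : PySem.List.pyGetD temp ((i : Int) + (j : Int)) '?' = temp[i + j] := by
        rw [hcast, PySem.List.pyGetD_natCast, List.getD_eq_getElem temp '?' hij]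
      have hdropt : temp.drop (i + j) = temp[i + j] :: temp.drop (i + j + 1) :=
        List.drop_eq_getElem_cons hij
      have hdrops : s.drop j = s[j] :: s.drop (j + 1) := List.drop_eq_getElem_cons h
      have hsub : s.length - j = (s.length - (j + 1)) + 1 := by omega
      rw [hdropt, hdrops, hsub, List.take_succ_cons, List.zip_cons_cons, List.all_cons]
      by_cases hc : temp[i + j] ≠ '?' ∧ temp[i + j] ≠ s[j]
      · have : (temp[i + j] == '?' || temp[i + j] == s[j]) = false := by
          simp [hc.1, hc.2]
        simp only [hget, if_pos hc]
        simp [this]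
      · simp only [hget, hc, if_neg, not_false_eq_true]
        have htoNat : ((i : Int) + (j : Int)).toNat = i + j := by omega
        rw [htoNat]
        have hrec := ih (j + 1) (temp.set (i + j) s[j]) (by omega) (by simpa using hlen)
        rw [show i + (j + 1) = i + j + 1 by omega] at hrec
        rw [hrec, List.drop_set_of_lt (by omega : i + j < i + j + 1)]
        have : (temp[i + j] == '?' || temp[i + j] == s[j]) = true := by
          rcases not_and_or.mp hc with h1 | h1 <;> simp [Decidable.not_not.mp h1]
        simp [this]
    · have hj : s.length ≤ j := Nat.not_lt.mp h
      rw [pvFillA]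
      simp [h, List.drop_eq_nil_iff.mpr hj]

-- when the flag is true, the temp list A built is word with substr overlaid on the window
lemma pvFillA_snd (s : List Char) (i : Nat) :
    ∀ (d j : Nat) (temp : List Char), s.length - j ≤ d → j ≤ s.length →
    i + s.length ≤ temp.length →
    (pvFillA s (i : Int) j temp).1 = true →
    (pvFillA s (i : Int) j temp).2
      = temp.take (i + j) ++ s.drop j ++ temp.drop (i + s.length) := by
  intro d
  induction d with
  | zero =>
    intro j temp hd hj hlen _
    have hj' : j = s.length := by omega
    subst hj'
    rw [pvFillA]
    simp [List.take_append_drop]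
  | succ d ih =>
    intro j temp hd hj hlen htrue
    by_cases h : j < s.length
    · have hij : i + j < temp.length := by omega
      rw [pvFillA] at htrue ⊢
      simp only [h, dif_pos] at htrue ⊢
      by_cases hc : PySem.List.pyGetD temp ((i : Int) + (j : Int)) '?' ≠ '?' ∧
          PySem.List.pyGetD temp ((i : Int) + (j : Int)) '?' ≠ s[j]
      · simp [hc] at htrue
      · simp only [hc, if_neg, not_false_eq_true] at htrue ⊢
        have htoNat : ((i : Int) + (j : Int)).toNat = i + j := by omega
        rw [htoNat] at htrue ⊢
        have hrec := ih (j + 1) (temp.set (i + j) s[j]) (by omega) (by omega)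
          (by simpa using hlen) htrue
        rw [show i + (j + 1) = i + j + 1 by omega] at hrec
        rw [hrec, List.drop_set_of_lt (by omega : i + j < i + s.length)]
        have htake : (temp.set (i + j) s[j]).take (i + j + 1) = temp.take (i + j) ++ [s[j]] := by
          rw [List.set_eq_take_append_cons_drop, if_pos hij, List.take_append]
          simp [List.length_take, Nat.min_eq_left hij.le]
        rw [htake, List.drop_eq_getElem_cons h]
        simp
    · have hj' : j = s.length := by omega
      subst hj'
      rw [pvFillA]
      simp [List.take_append_drop]

-- A's flag at a valid window equals B's zip/all test
lemma pvValid_eq (w s : List Char) (i : Int) (h0 : 0 ≤ i)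
    (hle : i + (s.length : Int) ≤ (w.length : Int)) :
    (pvFillA s i 0 w).1
      = ((PySem.List.slice w (some i) (some (i + (s.length : Int)))).zip s).all
          (fun p => p.1 == '?' || p.1 == p.2) := by
  obtain ⟨iN, rfl⟩ : ∃ iN : Nat, i = (iN : Int) := ⟨i.toNat, (Int.toNat_of_nonneg h0).symm⟩
  have hleN : iN + s.length ≤ w.length := by exact_mod_cast hle
  rw [PySem.List.slice_natCast_add, pvFillA_fst s iN s.length 0 w (by omega) hleN]
  simp

-- A's filled candidate at a valid window is pvCand
lemma pvCandA_eq (w s : List Char) (iN : Nat)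
    (hle : iN + s.length ≤ w.length)
    (htrue : (pvFillA s (iN : Int) 0 w).1 = true) :
    (pvFillA s (iN : Int) 0 w).2.map (fun c => if c = '?' then 'a' else c) = pvCand w s iN := by
  rw [pvFillA_snd s iN s.length 0 w (by omega) (by omega) hle htrue]
  simp [pvCand]

lemma pvCand_length (w s : List Char) (i : Nat) (hle : i + s.length ≤ w.length) :
    (pvCand w s i).length = w.length := by
  simp [pvCand]
  omega

-- pvCharB computes the p-th character of pvCand
lemma pvCharB_getElem (w s : List Char) (iN pN : Nat) (hle : iN + s.length ≤ w.length)
    (hp : pN < w.length) :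
    pvCharB w s (iN : Int) (pN : Int)
      = (pvCand w s iN)[pN]'(by rw [pvCand_length w s iN hle]; exact hp) := by
  have htk : (w.take iN).length = iN := by simp [List.length_take]; omega
  have hts : (w.take iN ++ s).length = iN + s.length := by
    rw [List.length_append, htk]
  unfold pvCharB pvCand
  rw [List.getElem_map]
  by_cases hw : iN ≤ pN ∧ pN < iN + s.length
  · have hcond : (iN : Int) ≤ (pN : Int) ∧ (pN : Int) < (iN : Int) + (s.length : Int) := by
      constructor <;> [exact_mod_cast hw.1; (push_cast; omega)]
    rw [if_pos hcond]
    have hdiff : (pN : Int) - (iN : Int) = ((pN - iN : Nat) : Int) := by omega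
    have hs : pN - iN < s.length := by omega
    rw [hdiff, PySem.List.pyGetD_natCast, List.getD_eq_getElem s '?' hs]
    rw [List.getElem_append_left (by rw [hts]; omega : pN < (w.take iN ++ s).length),
        List.getElem_append_right (by rw [htk]; omega : (w.take iN).length ≤ pN)]
    simp only [htk]
  · have hcond : ¬ ((iN : Int) ≤ (pN : Int) ∧ (pN : Int) < (iN : Int) + (s.length : Int)) := by
      intro hc
      exact hw ⟨by exact_mod_cast hc.1, by
        have := hc.2; push_cast at this; omega⟩
    rw [if_neg hcond, PySem.List.pyGetD_natCast, List.getD_eq_getElem w '?' hp]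
    rcases Nat.lt_or_ge pN iN with hlt | hge
    · rw [List.getElem_append_left (by rw [hts]; omega : pN < (w.take iN ++ s).length),
          List.getElem_append_left (by rw [htk]; omega : pN < (w.take iN).length),
          List.getElem_take]
    · have hge2 : iN + s.length ≤ pN := by omega
      rw [List.getElem_append_right (by rw [hts]; omega : (w.take iN ++ s).length ≤ pN)]
      rw [List.getElem_drop]
      have hidx : iN + s.length + (pN - (w.take iN ++ s).length) = pN := by
        rw [hts]; omega
      simp only [hidx]

-- outside the window union the characters of two candidates agree
lemma pvCharB_outside (w s : List Char) (iN bN pN : Nat)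
    (hiw : ¬ (iN ≤ pN ∧ pN < iN + s.length)) (hbw : ¬ (bN ≤ pN ∧ pN < bN + s.length)) :
    pvCharB w s (iN : Int) (pN : Int) = pvCharB w s (bN : Int) (pN : Int) := by
  have h1 : ¬ ((iN : Int) ≤ (pN : Int) ∧ (pN : Int) < (iN : Int) + (s.length : Int)) := by
    intro hc
    exact hiw ⟨by exact_mod_cast hc.1, by have := hc.2; push_cast at this; omega⟩
  have h2 : ¬ ((bN : Int) ≤ (pN : Int) ∧ (pN : Int) < (bN : Int) + (s.length : Int)) := by
    intro hc
    exact hbw ⟨by exact_mod_cast hc.1, by have := hc.2; push_cast at this; omega⟩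
  unfold pvCharB
  rw [if_neg h1, if_neg h2]

-- the final join over range(n) is pvCand at the chosen position
lemma pvBuild_eq (w s : List Char) (iN : Nat) (hle : iN + s.length ≤ w.length) :
    (PySem.List.pyRange 0 (w.length : Int) 1).map (fun p => pvCharB w s (iN : Int) p)
      = pvCand w s iN := by
  rw [PySem.List.pyRange_zero_natCast, List.map_map]
  apply List.ext_getElem
  · simp [pvCand_length w s iN hle]
  · intro p h1 h2
    simp only [List.getElem_map, List.getElem_range, Function.comp_apply]
    have hp : p < w.length := by simpa using h1
    rw [pvCharB_getElem w s iN p hle hp]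

-- character-by-character scan with early exit = lexicographic comparison of equal-length lists
def pvLexScan : List Char → List Char → Bool
  | a :: u, b :: v => if a ≠ b then decide (a < b) else pvLexScan u v
  | _, _ => false

lemma pvLexScan_eq : ∀ (u v : List Char), u.length = v.length →
    pvLexScan u v = decide (u < v) := by
  intro u
  induction u with
  | nil =>
    intro v h
    cases v with
    | nil =>
      rw [show pvLexScan [] [] = false from rfl, eq_comm, decide_eq_false_iff_not]
      exact List.not_lt_nil _
    | cons b v => simp at h
  | cons a u ih =>
    intro v h
    cases v with
    | nil => simp at h
    | cons b v =>
      simp only [pvLexScan]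
      by_cases hab : a = b
      · subst hab
        rw [if_neg (by simp), ih v (by simpa using h), decide_eq_decide,
          List.cons_lt_cons_iff]
        simp
      · rw [if_pos (by simpa using hab), decide_eq_decide, List.cons_lt_cons_iff]
        simp [hab]

-- a prefix common to both sides cancels in the list order
lemma pvLt_append_left (P : List Char) : ∀ x y : List Char, (P ++ x < P ++ y) ↔ x < y := by
  induction P with
  | nil => intro x y; simp
  | cons a P ih =>
    intro x y
    simp only [List.cons_append, List.cons_lt_cons_iff]
    simp [ih]

-- a suffix common to both sides cancels when the parts before it have equal length
lemma pvLt_append_right : ∀ (u v S : List Char), u.length = v.length →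
    (u ++ S < v ++ S ↔ u < v) := by
  intro u
  induction u with
  | nil =>
    intro v S h
    cases v with
    | nil =>
      simp only [List.nil_append]
      constructor
      · intro hc; exact absurd hc (lt_irrefl S)
      · intro hc; exact absurd hc (List.not_lt_nil [])
    | cons b v => simp at h
  | cons a u ih =>
    intro v S h
    cases v with
    | nil => simp at h
    | cons b v =>
      simp only [List.cons_append, List.cons_lt_cons_iff]
      rw [ih v S (by simpa using h)]

-- range(a, a+k) as a Nat range
lemma pvPyRange_natCast (a k : Nat) :
    PySem.List.pyRange (a : Int) ((a + k : Nat) : Int) 1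
      = (List.range' a k).map (fun q : Nat => (q : Int)) := by
  induction k generalizing a with
  | zero =>
    apply List.eq_nil_iff_forall_not_mem.mpr
    intro x hx
    have := PySem.List.mem_pyRange_one.mp hx
    omega
  | succ k ih =>
    rw [PySem.List.pyRange_one_cons (by push_cast; omega), List.range'_succ, List.map_cons]
    have h1 : ((a : Int) + 1) = ((a + 1 : Nat) : Int) := by push_cast; ring
    have h2 : ((a + (k + 1) : Nat) : Int) = (((a + 1) + k : Nat) : Int) := by push_cast; ring
    rw [h1, h2, ih (a + 1)]

-- the p-loop of _less scans the two per-position character streams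
lemma pvLessGo_eq (w s : List Char) (i b : Int) : ∀ ps : List Int,
    pvLessGo w s i b ps
      = pvLexScan (ps.map (pvCharB w s i)) (ps.map (pvCharB w s b)) := by
  intro ps
  induction ps with
  | nil => rfl
  | cons p ps ih => simp only [pvLessGo, List.map_cons, pvLexScan, ih]

-- the window-union character stream is the matching slice of the candidate
lemma pvMid_eq (w s : List Char) (iN lo k : Nat) (hle : iN + s.length ≤ w.length)
    (hbound : lo + k ≤ w.length) :
    (List.range' lo k).map (fun q : Nat => pvCharB w s (iN : Int) (q : Int))
      = ((pvCand w s iN).drop lo).take k := by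
  apply List.ext_getElem
  · simp [pvCand_length w s iN hle]
    omega
  · intro q h1 h2
    have hq : lo + q < w.length := by
      simp at h1
      omega
    simp only [List.getElem_map, List.getElem_range', List.getElem_take, List.getElem_drop]
    rw [show lo + 1 * q = lo + q from by omega, pvCharB_getElem w s iN (lo + q) hle hq]

-- _less is the lexicographic comparison of the two candidates
lemma pvLessB_eq (w s : List Char) (iN bN : Nat)
    (hi : iN + s.length ≤ w.length) (hb : bN + s.length ≤ w.length) :
    pvLessB w s (iN : Int) (bN : Int) = decide (pvCand w s iN < pvCand w s bN) := by
  have hlenI := pvCand_length w s iN hi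
  have hlenB := pvCand_length w s bN hb
  -- the loop bounds
  set lo := min iN bN with hlo
  set hi' := max iN bN + s.length with hhi
  have hlohi : lo ≤ hi' := by omega
  have hhiw : hi' ≤ w.length := by omega
  set k := hi' - lo with hk
  -- the loop = scan of the two character streams over [lo, hi')
  have hrange : PySem.List.pyRange (min (iN : Int) (bN : Int))
      (max (iN : Int) (bN : Int) + (s.length : Int)) 1
      = (List.range' lo k).map (fun q : Nat => (q : Int)) := by
    rw [show min (iN : Int) (bN : Int) = ((lo : Nat) : Int) by rw [hlo]; push_cast; omega,
        show max (iN : Int) (bN : Int) + (s.length : Int) = ((lo + k : Nat) : Int) by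
          push_cast; omega]
    exact pvPyRange_natCast lo k
  rw [pvLessB, hrange, pvLessGo_eq, List.map_map, List.map_map]
  simp only [Function.comp_def]
  rw [pvMid_eq w s iN lo k hi (by omega), pvMid_eq w s bN lo k hb (by omega)]
  have hmlen : (((pvCand w s iN).drop lo).take k).length
      = (((pvCand w s bN).drop lo).take k).length := by
    simp [hlenI, hlenB]
  rw [pvLexScan_eq _ _ hmlen, decide_eq_decide]
  -- common prefix and suffix
  have hpre : (pvCand w s iN).take lo = (pvCand w s bN).take lo := by
    apply List.ext_getElem
    · simp [hlenI, hlenB]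
    · intro p h1 h2
      have hp : p < w.length := by simp [hlenI] at h1; omega
      have hplo : p < lo := by simp [hlenI] at h1; omega
      simp only [List.getElem_take]
      rw [← pvCharB_getElem w s iN p hi hp, ← pvCharB_getElem w s bN p hb hp]
      exact pvCharB_outside w s iN bN p (by omega) (by omega)
  have hsuf : (pvCand w s iN).drop (lo + k) = (pvCand w s bN).drop (lo + k) := by
    apply List.ext_getElem
    · simp [hlenI, hlenB]
    · intro q h1 h2
      have hq : lo + k + q < w.length := by simp [hlenI] at h1; omega
      simp only [List.getElem_drop]
      rw [← pvCharB_getElem w s iN (lo + k + q) hi hq,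
          ← pvCharB_getElem w s bN (lo + k + q) hb hq]
      exact pvCharB_outside w s iN bN (lo + k + q) (by omega) (by omega)
  have hdecomp : ∀ x : List Char,
      x = x.take lo ++ (((x.drop lo).take k) ++ x.drop (lo + k)) := by
    intro x
    have h1 : x.drop (lo + k) = ((x.drop lo)).drop k := by rw [List.drop_drop]
    rw [h1, List.take_append_drop, List.take_append_drop]
  conv_rhs => rw [hdecomp (pvCand w s iN), hdecomp (pvCand w s bN)]
  rw [hpre, hsuf, pvLt_append_left, pvLt_append_right _ _ _ (by simpa using hmlen)]

-- the running-min step Python's min() performs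
def pvMinStep (acc : Option (List Char)) (x : List Char) : Option (List Char) :=
  match acc with
  | none => some x
  | some m => if x < m then some x else some m

lemma pvMin?_eq (L : List (List Char)) :
    PySem.List.min? L (fun x => x) = L.foldl pvMinStep none := by
  unfold PySem.List.min?
  congr 1
  funext acc x
  cases acc <;> rfl

-- argmin-by-position fold ↔ running-min-of-values fold
lemma pvArgmin (p : Int → Bool) (f : Int → List Char) (lt : Int → Int → Bool) (Q : Int → Prop)
    (hQ0 : ∀ b, Q b → 0 ≤ b) :
    ∀ (R : List Int) (b : Int) (acc : Option (List Char)),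
    (∀ i ∈ R, Q i) →
    (∀ i ∈ R, ∀ c, Q c → lt i c = decide (f i < f c)) →
    ((b = -1 ∧ acc = none) ∨ (Q b ∧ acc = some (f b))) →
    ((R.foldl (fun best i =>
        if p i then (if decide (best < 0) || lt i best then i else best) else best) b = -1
      ∧ ((R.filter p).map f).foldl pvMinStep acc = none)
     ∨ (Q (R.foldl (fun best i =>
          if p i then (if decide (best < 0) || lt i best then i else best) else best) b)
        ∧ ((R.filter p).map f).foldl pvMinStep acc
          = some (f (R.foldl (fun best i =>
              if p i then (if decide (best < 0) || lt i best then i else best) else best) b)))) := by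
  intro R
  induction R with
  | nil =>
    intro b acc _ _ hinv
    simpa using hinv
  | cons i R ih =>
    intro b acc hQ hlt hinv
    simp only [List.foldl_cons]
    by_cases hp : p i = true
    · rw [List.filter_cons_of_pos hp, List.map_cons]
      simp only [List.foldl_cons, if_pos hp]
      rcases hinv with ⟨hb, hacc⟩ | ⟨hQb, hacc⟩
      · subst hb; subst hacc
        rw [if_pos (by simp)]
        exact ih i (some (f i)) (fun x hx => hQ x (List.mem_cons_of_mem _ hx))
          (fun x hx => hlt x (List.mem_cons_of_mem _ hx))
          (Or.inr ⟨hQ i List.mem_cons_self, rfl⟩)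
      · subst hacc
        have hb0 : ¬ (b < 0) := by have := hQ0 b hQb; omega
        rw [hlt i List.mem_cons_self b hQb]
        rw [show pvMinStep (some (f b)) (f i)
            = if f i < f b then some (f i) else some (f b) from rfl]
        by_cases hfi : f i < f b
        · rw [if_pos (by simp [hfi]), if_pos hfi]
          exact ih i (some (f i)) (fun x hx => hQ x (List.mem_cons_of_mem _ hx))
            (fun x hx => hlt x (List.mem_cons_of_mem _ hx))
            (Or.inr ⟨hQ i List.mem_cons_self, rfl⟩)
        · rw [if_neg (by simp [hfi, hb0]), if_neg hfi]
          exact ih b (some (f b)) (fun x hx => hQ x (List.mem_cons_of_mem _ hx))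
            (fun x hx => hlt x (List.mem_cons_of_mem _ hx))
            (Or.inr ⟨hQb, rfl⟩)
    · rw [List.filter_cons_of_neg hp, if_neg hp]
      exact ih b acc (fun x hx => hQ x (List.mem_cons_of_mem _ hx))
        (fun x hx => hlt x (List.mem_cons_of_mem _ hx)) hinv

-- the collected candidate list of A, as filter+map over the range
lemma pvCandidates_eq (w s : List Char) :
    ((PySem.List.pyRange 0 ((w.length : Int) - (s.length : Int) + 1) 1).foldl
        (fun cands i =>
          let r := pvFillA s i 0 w
          if r.1 then cands ++ [r.2.map (fun c => if c = '?' then 'a' else c)] else cands) [])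
      = (((PySem.List.pyRange 0 ((w.length : Int) - (s.length : Int) + 1) 1).filter
            (fun i => (pvFillA s i 0 w).1)).map
          (fun i => (pvFillA s i 0 w).2.map (fun c => if c = '?' then 'a' else c))) := by
  rw [PySem.List.foldl_append_if (fun i => (pvFillA s i 0 w).1)
        (fun i => (pvFillA s i 0 w).2.map (fun c => if c = '?' then 'a' else c))]
  simp

-- the whole equivalence, on the list level
lemma pvMain (w s : List Char) :
    (match PySem.List.min?
        ((PySem.List.pyRange 0 ((w.length : Int) - (s.length : Int) + 1) 1).foldl
          (fun cands i =>
            let r := pvFillA s i 0 w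
            if r.1 then cands ++ [r.2.map (fun c => if c = '?' then 'a' else c)] else cands) [])
        (fun x => x) with
      | some v => String.ofList v
      | none => "-1")
    = (if ((PySem.List.pyRange 0 ((w.length : Int) - (s.length : Int) + 1) 1).foldl
          (fun best i =>
            if ((PySem.List.slice w (some i) (some (i + (s.length : Int)))).zip s).all
                 (fun p => p.1 == '?' || p.1 == p.2) then
              if decide (best < 0) || pvLessB w s i best then i else best
            else best) (-1)) < 0 then "-1"
       else String.ofList ((PySem.List.pyRange 0 (w.length : Int) 1).map
              (fun p => pvCharB w s
                ((PySem.List.pyRange 0 ((w.length : Int) - (s.length : Int) + 1) 1).foldl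
                  (fun best i =>
                    if ((PySem.List.slice w (some i) (some (i + (s.length : Int)))).zip s).all
                         (fun p => p.1 == '?' || p.1 == p.2) then
                      if decide (best < 0) || pvLessB w s i best then i else best
                    else best) (-1)) p))) := by
  have hmem : ∀ i ∈ PySem.List.pyRange 0 ((w.length : Int) - (s.length : Int) + 1) 1,
      0 ≤ i ∧ i + (s.length : Int) ≤ (w.length : Int) := by
    intro i hi
    have := PySem.List.mem_pyRange_one.mp hi
    omega
  rw [pvCandidates_eq w s]
  rw [List.filter_congr (fun i hi => pvValid_eq w s i (hmem i hi).1 (hmem i hi).2)]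
  rw [List.map_congr_left (g := fun i : Int => pvCand w s i.toNat) (by
    intro i hifil
    obtain ⟨hiR, hPi⟩ := List.mem_filter.mp hifil
    obtain ⟨h0, hm⟩ := hmem i hiR
    obtain ⟨iN, rfl⟩ : ∃ iN : Nat, i = (iN : Int) := ⟨i.toNat, (Int.toNat_of_nonneg h0).symm⟩
    have hleN : iN + s.length ≤ w.length := by exact_mod_cast hm
    have htrue : (pvFillA s (iN : Int) 0 w).1 = true := by
      rw [pvValid_eq w s (iN : Int) h0 hm]
      exact hPi
    rw [pvCandA_eq w s iN hleN htrue]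
    simp)]
  rw [pvMin?_eq]
  have harg := pvArgmin
    (fun i => ((PySem.List.slice w (some i) (some (i + (s.length : Int)))).zip s).all
      (fun p => p.1 == '?' || p.1 == p.2))
    (fun i : Int => pvCand w s i.toNat)
    (pvLessB w s)
    (fun b : Int => 0 ≤ b ∧ b + (s.length : Int) ≤ (w.length : Int))
    (fun b hb => hb.1)
    (PySem.List.pyRange 0 ((w.length : Int) - (s.length : Int) + 1) 1) (-1) none
    hmem
    (by
      intro i hi c hc
      obtain ⟨h0, hm⟩ := hmem i hi
      obtain ⟨iN, rfl⟩ : ∃ iN : Nat, i = (iN : Int) := ⟨i.toNat, (Int.toNat_of_nonneg h0).symm⟩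
      obtain ⟨cN, rfl⟩ : ∃ cN : Nat, c = (cN : Int) := ⟨c.toNat, (Int.toNat_of_nonneg hc.1).symm⟩
      have h1 : iN + s.length ≤ w.length := by exact_mod_cast hm
      have h2 : cN + s.length ≤ w.length := by
        have := hc.2
        exact_mod_cast this
      rw [pvLessB_eq w s iN cN h1 h2]
      simp)
    (Or.inl ⟨rfl, rfl⟩)
  beta_reduce at harg
  rcases harg with ⟨hbest, hacc⟩ | ⟨⟨hb0, hbm⟩, hacc⟩
  · rw [hacc, hbest]
    norm_num
  · rw [hacc]
    rw [if_neg (by omega)]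
    obtain ⟨bN, hbN⟩ : ∃ bN : Nat,
        (PySem.List.pyRange 0 ((w.length : Int) - (s.length : Int) + 1) 1).foldl
          (fun best i =>
            if ((PySem.List.slice w (some i) (some (i + (s.length : Int)))).zip s).all
                 (fun p => p.1 == '?' || p.1 == p.2) then
              if decide (best < 0) || pvLessB w s i best then i else best
            else best) (-1) = (bN : Int) := ⟨_, (Int.toNat_of_nonneg hb0).symm⟩
    rw [hbN]
    have hleN : bN + s.length ≤ w.length := by
      rw [hbN] at hbm
      exact_mod_cast hbm
    rw [pvBuild_eq w s bN hleN]
    simp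

-- ===== VERDICT (by name: the statement is the Claim_ definition above) =====
theorem smallest_with_substring_spec : Claim_equal_smallest_with_substring := by
  intro word substr _
  simp only [Spec_smallest_with_substring, smallest_with_substring, smallest_with_substring_alt]
  exact pvMain word.toList substr.toList
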